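-- pv_equiv track=rewrite | github.com/mokscodes/islabsem5 | autokey.py | autokey_cipher_encrypt
-- ===== SOURCE A (Python) =====
-- def autokey_cipher_encrypt(plaintext, key):
--     ciphertext = ""
--     prev_val = key
--     for char in plaintext:
--         ascii_val = ord(char)
--         encrypted_val = (ascii_val + prev_val) % 256
--         ciphertext += chr(encrypted_val)
--         prev_val = encrypted_val
--     return ciphertext
-- ===== SOURCE B (Python) =====
-- def autokey_cipher_encrypt(plaintext, key):
--     # Divide and conquer: encrypt the two halves independently; the right half's
--     # seed is key + total ord of the left half, which is congruent mod 256 to the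
--     # last ciphertext byte of the left half, so the results concatenate exactly.
--     def go(s, k):
--         n = len(s)
--         if n == 0:
--             return ""
--         if n == 1:
--             return chr((k + ord(s)) % 256)
--         mid = n // 2
--         left = s[:mid]
--         return go(left, k) + go(s[mid:], k + sum(map(ord, left)))
--     return go(plaintext, key)
-- ===== Notes on version B (the rewrite author's own statement) =====
-- stated objective: alternative
-- what changed: B replaces A's sequential byte-feedback loop by a divide-and-conquer recursion: it splits the plaintext in half, encrypts each half independently, seeding the right half with key plus the total ord of the left half (congruent mod 256 to the left half's last ciphertext byte), and concatenates.
import Mathlib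
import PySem

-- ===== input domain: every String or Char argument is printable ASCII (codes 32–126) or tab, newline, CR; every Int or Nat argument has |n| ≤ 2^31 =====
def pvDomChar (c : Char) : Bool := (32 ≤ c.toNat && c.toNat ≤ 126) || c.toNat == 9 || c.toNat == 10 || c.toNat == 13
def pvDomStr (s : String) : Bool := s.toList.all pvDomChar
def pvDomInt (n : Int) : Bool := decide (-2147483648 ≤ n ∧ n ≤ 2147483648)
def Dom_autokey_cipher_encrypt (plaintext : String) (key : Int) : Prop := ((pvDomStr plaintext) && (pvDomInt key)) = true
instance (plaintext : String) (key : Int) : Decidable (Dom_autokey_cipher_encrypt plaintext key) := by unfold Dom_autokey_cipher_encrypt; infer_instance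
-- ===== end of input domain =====

-- B replaces A's sequential byte feedback by a divide-and-conquer recursion on halves (alternative decomposition, not claimed faster); proved equal on all inputs.

-- ===== PORT A =====
-- A's loop: prev starts at key, each step emits chr((ord c + prev) % 256) and feeds that byte back.
def pvAGo : List Char → Int → List Char
  | [], _ => []
  | c :: cs, prev =>
    let encrypted_val := PySem.Int.mod ((c.toNat : Int) + prev) 256
    Char.ofNat encrypted_val.toNat :: pvAGo cs encrypted_val

def autokey_cipher_encrypt (plaintext : String) (key : Int) : String :=
  String.ofList (pvAGo plaintext.toList key)

-- ===== PORT B =====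
-- sum(map(ord, left)) in Source B
def pvOrdSum (s : List Char) : Int := (s.map (fun c => (c.toNat : Int))).sum

-- go(s, k) of Source B: split at len//2, encrypt halves, seed right with k + ord-sum of left
def pvBGo : List Char → Int → List Char
  | [], _ => []
  | [c], k => [Char.ofNat (PySem.Int.mod (k + (c.toNat : Int)) 256).toNat]
  | c1 :: c2 :: rest, k =>
    let s := c1 :: c2 :: rest
    let mid := s.length / 2
    pvBGo (s.take mid) k ++ pvBGo (s.drop mid) (k + pvOrdSum (s.take mid))
termination_by s _ => s.length
decreasing_by
  · simp [List.length_take]; omega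
  · simp; omega

def autokey_cipher_encrypt_alt (plaintext : String) (key : Int) : String :=
  String.ofList (pvBGo plaintext.toList key)

-- ===== PRECONDITION & SPEC =====
def Spec_autokey_cipher_encrypt (plaintext : String) (key : Int) (out : String) : Prop := out = autokey_cipher_encrypt_alt plaintext key
instance (plaintext : String) (key : Int) (out : String) : Decidable (Spec_autokey_cipher_encrypt plaintext key out) := by unfold Spec_autokey_cipher_encrypt; infer_instance

-- ===== CLAIM (what is proved, stated in full; the proofs are below) =====
def Claim_equal_autokey_cipher_encrypt : Prop := ∀ (plaintext : String) (key : Int), Dom_autokey_cipher_encrypt plaintext key → Spec_autokey_cipher_encrypt plaintext key (autokey_cipher_encrypt plaintext key)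

-- ===== LEMMAS AND PROOFS =====

-- A's loop depends on the seed only modulo 256
theorem pvAGo_congr (cs : List Char) :
    ∀ p q : Int, PySem.Int.mod p 256 = PySem.Int.mod q 256 → pvAGo cs p = pvAGo cs q := by
  induction cs with
  | nil => intro p q _; rfl
  | cons c cs ih =>
    intro p q h
    have h256 : (0:Int) < 256 := by norm_num
    have hmod : PySem.Int.mod ((c.toNat : Int) + p) 256 = PySem.Int.mod ((c.toNat : Int) + q) 256 := by
      rw [PySem.Int.mod_eq_emod_of_pos h256, PySem.Int.mod_eq_emod_of_pos h256]
      rw [PySem.Int.mod_eq_emod_of_pos h256, PySem.Int.mod_eq_emod_of_pos h256] at h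
      omega
    simp only [pvAGo, hmod]

-- A's loop over a concatenation: the right part runs from seed + ord-sum of the left part
theorem pvAGo_append (xs : List Char) :
    ∀ (ys : List Char) (p : Int), pvAGo (xs ++ ys) p = pvAGo xs p ++ pvAGo ys (p + pvOrdSum xs) := by
  induction xs with
  | nil => intro ys p; simp [pvAGo, pvOrdSum]
  | cons c cs ih =>
    intro ys p
    simp only [List.cons_append, pvAGo, ih]
    refine congrArg _ (congrArg _ (pvAGo_congr ys _ _ ?_))
    have h256 : (0:Int) < 256 := by norm_num
    have : PySem.Int.mod (PySem.Int.mod ((c.toNat : Int) + p) 256) 256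
         = PySem.Int.mod ((c.toNat : Int) + p) 256 := by
      rw [PySem.Int.mod_eq_emod_of_pos h256, PySem.Int.mod_eq_emod_of_pos h256]
      exact Int.emod_emod_of_dvd _ dvd_rfl
    simp only [PySem.Int.mod_eq_emod_of_pos h256] at *
    simp [pvOrdSum]
    omega

-- divide-and-conquer equals the sequential loop (strong induction on length)
theorem pvBGo_eq_pvAGo : ∀ (n : Nat) (s : List Char) (k : Int), s.length ≤ n → pvBGo s k = pvAGo s k := by
  intro n
  induction n with
  | zero =>
    intro s k h
    have : s = [] := List.eq_nil_of_length_eq_zero (Nat.le_zero.mp h)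
    subst this; simp [pvBGo, pvAGo]
  | succ m ih =>
    intro s k h
    match s with
    | [] => simp [pvBGo, pvAGo]
    | [c] =>
      simp [pvBGo, pvAGo, Int.add_comm]
    | c1 :: c2 :: rest =>
      rw [pvBGo]
      have hlen : (c1 :: c2 :: rest).length = rest.length + 2 := by simp
      set s' := c1 :: c2 :: rest with hs
      set mid := s'.length / 2 with hmid
      have h1 : (s'.take mid).length ≤ m := by
        simp only [List.length_take]; simp only [hs] at h ⊢; simp at h ⊢; omega
      have h2 : (s'.drop mid).length ≤ m := by
        simp only [List.length_drop]; simp only [hs] at h ⊢; simp at h ⊢; omega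
      rw [ih _ _ h1, ih _ _ h2, ← pvAGo_append, List.take_append_drop]

-- ===== VERDICT (by name: the statement is the Claim_ definition above) =====
theorem autokey_cipher_encrypt_spec : Claim_equal_autokey_cipher_encrypt := by
  intro plaintext key _
  unfold Spec_autokey_cipher_encrypt autokey_cipher_encrypt autokey_cipher_encrypt_alt
  rw [pvBGo_eq_pvAGo plaintext.toList.length _ _ (le_refl _)]
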